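-- pv_equiv track=rewrite | github.com/PVL-Linh/Lap_Trinh_Tri_Tue_Nhan_Tao_2023 | cau_7_cach_2.py | not_edit_Doi_Xung
-- ===== SOURCE A (Python) =====
-- def not_edit_Doi_Xung (number):
--     dem1 = 0
--     dem_Le = 0
--     for i in number:
--         if number.count(i) == 1:
--
--             dem1+=1
--         elif number.count(i) % 3 == 0:
--             dem_Le+=1
--     if dem1 >= 2 or dem_Le>3:
--         return False
--     return True
-- ===== SOURCE B (Python) =====
-- def not_edit_Doi_Xung(number):
--     counts = {}
--     for x in number:
--         counts[x] = counts.get(x, 0) + 1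
--     dem1 = sum(1 for v in counts.values() if v == 1)
--     dem_Le = sum(v for v in counts.values() if v % 3 == 0)
--     return not (dem1 >= 2 or dem_Le > 3)
-- ===== Notes on version B (the rewrite author's own statement) =====
-- stated objective: faster
-- what changed: B builds a frequency dict in one pass and derives both counters from the distinct values (dem1 = number of values equal to 1, dem_Le = sum of the 3-divisible values), replacing A's per-element .count rescans.
import Mathlib
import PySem

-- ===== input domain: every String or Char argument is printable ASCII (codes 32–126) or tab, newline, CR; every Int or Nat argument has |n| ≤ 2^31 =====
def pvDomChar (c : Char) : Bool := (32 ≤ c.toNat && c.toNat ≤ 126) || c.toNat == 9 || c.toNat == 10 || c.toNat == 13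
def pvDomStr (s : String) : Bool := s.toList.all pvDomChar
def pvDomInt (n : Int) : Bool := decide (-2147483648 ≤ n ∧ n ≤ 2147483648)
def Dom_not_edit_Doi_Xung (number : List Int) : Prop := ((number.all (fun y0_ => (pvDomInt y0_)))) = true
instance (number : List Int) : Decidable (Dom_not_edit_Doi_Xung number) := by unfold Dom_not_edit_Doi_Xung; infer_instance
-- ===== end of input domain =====

-- B replaces A's per-element `.count` rescans (quadratic) by one frequency-dict pass and
-- derives both counters from the distinct values; a timing run measured it faster.

-- ===== PORT A =====
-- literal port of A: one loop over `number`, re-counting `number.count(i)` at each element,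
-- with the two accumulators (dem1, dem_Le); `%` is Python mod (PySem.Int.mod).
def not_edit_Doi_Xung (number : List Int) : Bool :=
  let r := number.foldl (fun s i =>
      if number.count i == 1 then (s.1 + 1, s.2)
      else if PySem.Int.mod ((number.count i : Int)) 3 == 0 then (s.1, s.2 + 1)
      else s) ((0:Int), (0:Int))
  if r.1 ≥ 2 ∨ r.2 > 3 then false else true

-- ===== PORT B =====
-- literal port of Source B: build the counts dict (counts[x] = counts.get(x,0)+1), then
-- dem1 = sum(1 for v in counts.values() if v == 1), dem_Le = sum(v for v in counts.values() if v % 3 == 0).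
def not_edit_Doi_Xung_alt (number : List Int) : Bool :=
  let counts : PySem.Dict Int Int :=
    number.foldl (fun d x => d.insert x (d.getD x 0 + 1)) PySem.Dict.empty
  let dem1 : Int := ((counts.values.filter (fun v => v == 1)).map (fun _ => (1:Int))).sum
  let demLe : Int := (counts.values.filter (fun v => PySem.Int.mod v 3 == 0)).sum
  !(decide (dem1 ≥ 2 ∨ demLe > 3))

-- ===== PRECONDITION & SPEC =====
def Spec_not_edit_Doi_Xung (number : List Int) (out : Bool) : Prop := out = not_edit_Doi_Xung_alt number
instance (number : List Int) (out : Bool) : Decidable (Spec_not_edit_Doi_Xung number out) := by unfold Spec_not_edit_Doi_Xung; infer_instance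

-- ===== CLAIM (what is proved, stated in full; the proofs are below) =====
def Claim_equal_not_edit_Doi_Xung : Prop := ∀ (number : List Int), Dom_not_edit_Doi_Xung number → Spec_not_edit_Doi_Xung number (not_edit_Doi_Xung number)

-- ===== LEMMAS AND PROOFS =====

-- countP over the whole list = sum, over the distinct elements satisfying the predicate, of their counts
theorem countP_eq_sum_dedup_counts (l : List Int) (q : Int → Bool) :
    l.countP q = (((PySem.List.dedup l).filter q).map (fun x => l.count x)).sum := by
  have hnd : ((PySem.List.dedup l).filter q).Nodup := (PySem.List.nodup_dedup l).filter _
  rw [← List.sum_toFinset _ hnd]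
  have hfin : ((PySem.List.dedup l).filter q).toFinset = (l.filter q).toFinset := by
    ext a; simp
  rw [hfin, List.countP_eq_length_filter, ← List.sum_toFinset_count_eq_length (l.filter q)]
  apply Finset.sum_congr rfl
  intro a ha
  simp only [List.mem_toFinset, List.mem_filter] at ha
  simp [List.count_filter, ha.2]

theorem countP_eq_sum_dedup_counts_int (l : List Int) (q : Int → Bool) :
    (((PySem.List.dedup l).filter q).map (fun x => (l.count x : Int))).sum = (l.countP q : Int) := by
  rw [countP_eq_sum_dedup_counts l q, Nat.cast_list_sum, List.map_map]; rfl

-- A's elif guard `count != 1` is redundant once `count % 3 == 0` holds (1 % 3 ≠ 0)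
theorem and_ne_one_mod_three (n : Nat) :
    ((!(n == 1)) && (PySem.Int.mod (n : Int) 3 == 0)) = (PySem.Int.mod (n : Int) 3 == 0) := by
  cases hmod : (PySem.Int.mod (n : Int) 3 == 0) with
  | false => simp only [Bool.and_false]
  | true =>
    have h3 : (3:Int) ∣ (n:Int) := (PySem.Int.mod_eq_zero_iff_dvd (n:Int) 3).mp (beq_iff_eq.mp hmod)
    have hn : ¬ (n == 1) = true := by
      simp only [beq_iff_eq]; rintro rfl; omega
    simp only [Bool.and_true, Bool.not_eq_true']
    simp [hn]

theorem if_false_true_eq_not_decide (P : Prop) [Decidable P] :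
    (if P then false else true) = !decide P := by
  by_cases h : P <;> simp [h]

-- ===== VERDICT (by name: the statement is the Claim_ definition above) =====
theorem not_edit_Doi_Xung_spec : Claim_equal_not_edit_Doi_Xung := by
  intro number _
  unfold Spec_not_edit_Doi_Xung not_edit_Doi_Xung not_edit_Doi_Xung_alt
  dsimp only
  -- A's single loop is two independent counting loops
  have hstep : (fun (s : Int × Int) i =>
      if number.count i == 1 then (s.1 + 1, s.2)
      else if PySem.Int.mod ((number.count i : Int)) 3 == 0 then (s.1, s.2 + 1)
      else s)
    = (fun (s : Int × Int) i =>
      ((if number.count i == 1 then s.1 + 1 else s.1),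
       (if (!(number.count i == 1)) && (PySem.Int.mod ((number.count i : Int)) 3 == 0) then s.2 + 1 else s.2))) := by
    funext s i
    by_cases h1 : number.count i == 1 <;> by_cases h2 : PySem.Int.mod ((number.count i : Int)) 3 == 0 <;>
      simp only [h1, h2, if_true, if_false, Bool.not_true, Bool.not_false, Bool.false_and,
        Bool.true_and, Bool.and_self, Bool.false_eq_true]
  rw [hstep,
    PySem.List.foldl_prod_mk
      (f := fun (a : Int) j => if number.count j == 1 then a + 1 else a)
      (g := fun (b : Int) j => if (!(number.count j == 1)) && (PySem.Int.mod ((number.count j : Int)) 3 == 0) then b + 1 else b),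
    PySem.List.foldl_if_add_one, PySem.List.foldl_if_add_one,
    PySem.Dict.foldl_insert_getD_add_one_eq_counter number]
  -- the counter's values are the counts of the distinct elements
  have hv : (PySem.Dict.counter number).values
      = (PySem.List.dedup number).map (fun k => (number.count k : Int)) := by
    show ((PySem.Dict.counter number).items).map (·.2)
        = (PySem.List.dedup number).map (fun k => (number.count k : Int))
    rw [PySem.Dict.items_counter, List.map_map, ← PySem.List.dedup_eq_ofList]
    rfl
  rw [hv, List.filter_map, List.filter_map, List.map_map]
  -- dem1: each retained distinct element has count 1, so summing 1s = summing counts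
  have hq1 : (List.map ((fun _ => (1:Int)) ∘ fun k => ((number.count k : Int)))
        (List.filter ((fun v => v == (1:Int)) ∘ fun k => ((number.count k : Int)))
          (PySem.List.dedup number)))
      = (List.map (fun k => ((number.count k : Int)))
        (List.filter ((fun v => v == (1:Int)) ∘ fun k => ((number.count k : Int)))
          (PySem.List.dedup number))) := by
    apply List.map_congr_left
    intro x hx
    have hx2 := (List.mem_filter.mp hx).2
    have hc : (number.count x : Int) = 1 := by
      simpa [Function.comp, beq_iff_eq] using hx2
    simp [Function.comp, hc]
  rw [hq1]
  have e1 := countP_eq_sum_dedup_counts_int number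
    (((fun v => v == (1:Int)) ∘ fun k => ((number.count k : Int))))
  have e2 := countP_eq_sum_dedup_counts_int number
    (((fun v => PySem.Int.mod v 3 == 0) ∘ fun k => ((number.count k : Int))))
  rw [e1, e2]
  -- unify the two sides' predicates
  have c1 : number.countP (fun j => number.count j == 1)
      = number.countP (((fun v => v == (1:Int)) ∘ fun k => ((number.count k : Int)))) := by
    apply List.countP_congr
    intro x _
    simp [Function.comp, beq_iff_eq]
  have c2 : number.countP (fun j => (!(number.count j == 1)) && (PySem.Int.mod ((number.count j : Int)) 3 == 0))
      = number.countP (((fun v => PySem.Int.mod v 3 == 0) ∘ fun k => ((number.count k : Int)))) := by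
    apply List.countP_congr
    intro x _
    simpa [Function.comp] using and_ne_one_mod_three (number.count x)
  rw [c1, c2]
  simp only [zero_add]
  exact if_false_true_eq_not_decide _
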